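-- pv_equiv track=rewrite | github.com/tedunderwood/reviews | parsers/makeexport/pair_index_with_reviews.py | split_discard_line
-- ===== SOURCE A (Python) =====
-- def find_occurrences(s, ch):
--     ''' Borrowed from
--     https://stackoverflow.com/questions/13009675/find-all-the-occurrences-of-a-character-in-a-string
--     '''
--     return [i for i, letter in enumerate(s) if letter == ch]
--
-- def split_discard_line(dline):
--     ''' The problem here is that we're given an unparsed line
--     from the "discard" set and need to transform it into the
--     most ~likely~ author, title pair. We won't get it exactly,
--     but we'll make a rough guess.
--
--     Our strategy is going to be simple. If there's a '(' in the
--     last 10 chars, discard everything to the right of it. Then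
--     just split the line roughly in half, and assume the left part is
--     author name!! Crude, but more work would confront diminishing
--     returns.
--
--     We will get a little more sophisticated by splitting on
--     punctuation if we have a choice of places to split in the middle.
--     But that's it.
--     '''
--
--     if len(dline) > 10 and '(' in dline[-9: ]:
--         parens = find_occurrences(dline, '(')
--         lastparen = parens[-1]
--         dline = dline[0 : lastparen]
--
--     midpoint = len(dline) // 2
--     radius = len(dline) // 8
--     periods = find_occurrences(dline, '.')
--     colons = find_occurrences(dline, ':')
--     semicolons = find_occurrences(dline, ';')
--     punct = periods + colons + semicolons
--     punct.sort()
--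
--     # Set the best division location to be the midpoint.
--     # Replace it by a punctuation loc if the punctuation
--     # loc is less than the radius. Then keep choosing
--     # nearer punctuation marks if they exist.
--
--     closest_index = midpoint
--     closeness = radius
--     for p in punct:
--         if abs(midpoint - p) < closeness:
--             closest_index = p
--             closeness = abs(midpoint - p)
--
--     author = dline[0 : closest_index]
--     title = dline[closest_index: ]
--
--     return author, title
-- ===== SOURCE B (Python) =====
-- def split_discard_line(dline):
--     ''' Same rough author/title guess, but instead of collecting every
--     punctuation index, sorting it and min-scanning, search OUTWARD from the
--     midpoint: the first punctuation mark found at distance d (left side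
--     checked first) is by construction the closest one with the same
--     tie-break, and the search stops after at most len//8 steps.
--     '''
--     n = len(dline)
--     if n > 10:
--         lastparen = dline.rfind('(')
--         if lastparen >= n - 9:
--             dline = dline[:lastparen]
--
--     midpoint = len(dline) // 2
--     closest_index = midpoint
--     for d in range(len(dline) // 8):
--         if dline[midpoint - d] in '.:;':
--             closest_index = midpoint - d
--             break
--         if dline[midpoint + d] in '.:;':
--             closest_index = midpoint + d
--             break
--
--     return dline[:closest_index], dline[closest_index:]
-- ===== Notes on version B (the rewrite author's own statement) =====
-- stated objective: faster
-- what changed: B replaces A's collect-all-punctuation-indices + sort + min-scan with an outward search from the midpoint (check midpoint-d then midpoint+d for d = 0..len//8-1, stopping at the first hit), plus str.rfind for the trailing-paren truncation; the first hit is by construction the closest punctuation mark with A's leftmost tie-break.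
import Mathlib
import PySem

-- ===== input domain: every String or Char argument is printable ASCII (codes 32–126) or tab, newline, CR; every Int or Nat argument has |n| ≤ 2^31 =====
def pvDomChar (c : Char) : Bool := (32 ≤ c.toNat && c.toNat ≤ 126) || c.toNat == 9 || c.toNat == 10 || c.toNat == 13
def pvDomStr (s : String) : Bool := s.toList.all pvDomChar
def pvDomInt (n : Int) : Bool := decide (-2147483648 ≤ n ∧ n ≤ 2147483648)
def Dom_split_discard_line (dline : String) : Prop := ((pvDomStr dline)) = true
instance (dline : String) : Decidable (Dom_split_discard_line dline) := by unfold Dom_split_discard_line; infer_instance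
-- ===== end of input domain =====

-- B replaces A's build-punctuation-index-lists + sort + min-scan by an outward search from the
-- midpoint (left side first, stop at the first hit) and str.rfind for the paren truncation.

-- ===== PORT A =====
-- find_occurrences(s, ch) = [i for i, letter in enumerate(s) if letter == ch]
def pvFindOcc (s : List Char) (ch : Char) : List Int :=
  ((PySem.List.enumerate s 0).filter (fun p => p.2 == ch)).map (fun p => p.1)

-- the part of A after the paren truncation (midpoint/radius/punct lists/sort/min-scan/split)
def pvTailA (s : List Char) : String × String :=
  let midpoint := PySem.Int.floordiv (s.length : Int) 2
  let radius := PySem.Int.floordiv (s.length : Int) 8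
  let periods := pvFindOcc s '.'
  let colons := pvFindOcc s ':'
  let semicolons := pvFindOcc s ';'
  let punct := PySem.List.sorted (periods ++ colons ++ semicolons) (fun x => x)
  let best := punct.foldl
    (fun st p => if |midpoint - p| < st.2 then (p, |midpoint - p|) else st)
    (midpoint, radius)
  (String.ofList (PySem.List.slice s (some 0) (some best.1)),
   String.ofList (PySem.List.slice s (some best.1) none))

def split_discard_line (dline : String) : String × String :=
  let s0 := dline.toList
  if 10 < (s0.length : Int) ∧ PySem.Chars.isIn ['('] (PySem.List.slice s0 (some (-9)) none) = true then
    let parens := pvFindOcc s0 '('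
    -- parens[-1]: the guard guarantees parens ≠ [], so the getD default is never used
    let lastparen := (PySem.List.pyGet? parens (-1)).getD 0
    pvTailA (PySem.List.slice s0 (some 0) (some lastparen))
  else pvTailA s0

-- ===== PORT B =====
-- "dline[i] in '.:;'": the loop only probes indices provably inside [0, len), so the
-- getD-free option match never hits `none` (Python never raises here)
def pvPunctAt (s : List Char) (i : Int) : Bool :=
  match PySem.List.pyGet? s i with
  | some c => c == '.' || c == ':' || c == ';'
  | none => false

-- "for d in range(radius): check midpoint-d, then midpoint+d, break on first hit"
def pvSearchGo (s : List Char) (mid : Int) (d : Nat) (rem : Nat) : Int :=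
  match rem with
  | 0 => mid
  | r + 1 =>
    if pvPunctAt s (mid - d) then mid - (d : Int)
    else if pvPunctAt s (mid + d) then mid + (d : Int)
    else pvSearchGo s mid (d + 1) r

-- the part of B after the paren truncation (outward search from the midpoint)
def pvTailB (s : List Char) : String × String :=
  let midpoint := PySem.Int.floordiv (s.length : Int) 2
  let ci := pvSearchGo s midpoint 0 (PySem.Int.floordiv (s.length : Int) 8).toNat
  (String.ofList (PySem.List.slice s none (some ci)),
   String.ofList (PySem.List.slice s (some ci) none))

def split_discard_line_alt (dline : String) : String × String :=
  let s0 := dline.toList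
  let n : Int := s0.length
  if 10 < n then
    let lastparen := PySem.Chars.rfind s0 ['(']
    if n - 9 ≤ lastparen then pvTailB (PySem.List.slice s0 none (some lastparen)) else pvTailB s0
  else pvTailB s0

-- ===== PRECONDITION & SPEC =====
def Spec_split_discard_line (dline : String) (out : String × String) : Prop := out = split_discard_line_alt dline
instance (dline : String) (out : String × String) : Decidable (Spec_split_discard_line dline out) := by unfold Spec_split_discard_line; infer_instance

-- ===== CLAIM (what is proved, stated in full; the proofs are below) =====
def Claim_equal_split_discard_line : Prop := ∀ (dline : String), Dom_split_discard_line dline → Spec_split_discard_line dline (split_discard_line dline)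

-- ===== LEMMAS AND PROOFS =====

-- the merged, sorted punctuation index list A builds
def pvP (s : List Char) : List Int :=
  ((PySem.List.enumerate s 0).filter (fun p => p.2 == '.' || p.2 == ':' || p.2 == ';')).map (fun p => p.1)

theorem pv_mem_occ {s : List Char} {c : Char} {j : Int} :
    j ∈ pvFindOcc s c ↔ ∃ k : Nat, ∃ h : k < s.length, j = (k : Int) ∧ s[k] = c := by
  unfold pvFindOcc
  simp only [List.mem_map, List.mem_filter, PySem.List.mem_enumerate_iff]
  constructor
  · rintro ⟨p, ⟨⟨k, hk, rfl⟩, hc⟩, rfl⟩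
    exact ⟨k, hk, by simp, by simpa using hc⟩
  · rintro ⟨k, hk, rfl, hc⟩
    exact ⟨((k : Int), s[k]), ⟨⟨k, hk, by simp⟩, by simpa using hc⟩, rfl⟩

theorem pv_occ_pairwise (s : List Char) (c : Char) : (pvFindOcc s c).Pairwise (· < ·) := by
  unfold pvFindOcc
  exact List.Pairwise.map _ (fun a b h => h) ((PySem.List.pairwise_lt_enumerate s 0).filter _)

theorem pv_perm_filter_or {α : Type} (l : List α) (p q : α → Bool)
    (h : ∀ x ∈ l, p x = true → q x = false) :
    (l.filter (fun x => p x || q x)).Perm (l.filter p ++ l.filter q) := by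
  induction l with
  | nil => simp
  | cons x t ih =>
    have ih' := ih (fun y hy => h y (List.mem_cons_of_mem x hy))
    by_cases hp : p x = true
    · simp [hp, h x (List.mem_cons_self) hp]
      exact ih'
    · simp only [Bool.not_eq_true] at hp
      by_cases hq : q x = true
      · simp [hp, hq]
        exact (ih'.cons x).trans (List.perm_middle).symm
      · simp only [Bool.not_eq_true] at hq
        simp [hp, hq]
        exact ih'

theorem pv_punct_merge (s : List Char) :
    PySem.List.sorted (pvFindOcc s '.' ++ pvFindOcc s ':' ++ pvFindOcc s ';') (fun x => x)
      = pvP s := by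
  apply PySem.List.sorted_eq_of_perm_of_pairwise_lt
  · have h1 : ((PySem.List.enumerate s 0).filter (fun p => p.2 == '.' || p.2 == ':' || p.2 == ';')).Perm
        ((PySem.List.enumerate s 0).filter (fun p => p.2 == '.') ++
          (PySem.List.enumerate s 0).filter (fun p => p.2 == ':' || p.2 == ';')) := by
      have := pv_perm_filter_or (PySem.List.enumerate s 0) (fun p => p.2 == '.') (fun p => p.2 == ':' || p.2 == ';')
        (by intro x _ hx; simp at hx ⊢; simp [hx])
      simpa [Bool.or_assoc] using this
    have h2 : ((PySem.List.enumerate s 0).filter (fun p => p.2 == ':' || p.2 == ';')).Perm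
        ((PySem.List.enumerate s 0).filter (fun p => p.2 == ':') ++
          (PySem.List.enumerate s 0).filter (fun p => p.2 == ';')) := by
      exact pv_perm_filter_or _ _ _
        (by intro x _ hx; simp at hx ⊢; intro h; rw [h] at hx; exact absurd hx (by decide))
    have := (h1.trans ((List.Perm.refl _).append h2)).map (fun p : Int × Char => p.1)
    simpa [pvP, pvFindOcc, List.map_append, List.append_assoc] using this
  · exact List.Pairwise.map _ (fun a b h => h) ((PySem.List.pairwise_lt_enumerate s 0).filter _)

theorem pv_P_pairwise (s : List Char) : (pvP s).Pairwise (· < ·) := by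
  unfold pvP
  exact List.Pairwise.map _ (fun a b h => h) ((PySem.List.pairwise_lt_enumerate s 0).filter _)

theorem pv_mem_P {s : List Char} {j : Int} :
    j ∈ pvP s ↔ ∃ k : Nat, ∃ h : k < s.length, j = (k : Int) ∧ (s[k] == '.' || s[k] == ':' || s[k] == ';') = true := by
  unfold pvP
  simp only [List.mem_map, List.mem_filter, PySem.List.mem_enumerate_iff]
  constructor
  · rintro ⟨p, ⟨⟨k, hk, rfl⟩, hc⟩, rfl⟩
    exact ⟨k, hk, by simp, by simpa using hc⟩
  · rintro ⟨k, hk, rfl, hc⟩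
    exact ⟨((k : Int), s[k]), ⟨⟨k, hk, by simp⟩, by simpa using hc⟩, rfl⟩

theorem pv_mem_P_iff {s : List Char} {j : Int} :
    j ∈ pvP s ↔ 0 ≤ j ∧ j < (s.length : Int) ∧ pvPunctAt s j = true := by
  rw [pv_mem_P]
  constructor
  · rintro ⟨k, hk, rfl, hc⟩
    refine ⟨by omega, by exact_mod_cast hk, ?_⟩
    unfold pvPunctAt
    rw [PySem.List.pyGet?_eq_some_getElem s (by omega) (by exact_mod_cast hk)]
    simpa using hc
  · rintro ⟨h0, h1, hc⟩
    unfold pvPunctAt at hc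
    rw [PySem.List.pyGet?_eq_some_getElem s h0 h1] at hc
    refine ⟨j.toNat, by omega, by omega, hc⟩

-- A's min-scan fold: no candidate strictly beats the current closeness ⇒ state unchanged
theorem pv_fold_no (mid : Int) (L : List Int) (r0 c0 : Int)
    (h : ∀ p ∈ L, c0 ≤ |mid - p|) :
    L.foldl (fun st p => if |mid - p| < st.2 then (p, |mid - p|) else st) (r0, c0) = (r0, c0) := by
  induction L with
  | nil => rfl
  | cons a t ih =>
    have ha := h a (List.mem_cons_self)
    simp only [List.foldl_cons, if_neg (by omega : ¬ |mid - a| < c0)]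
    exact ih (fun p hp => h p (List.mem_cons_of_mem a hp))

-- A's min-scan fold on a sorted list picks the unique first minimum
theorem pv_fold_yes (mid : Int) : ∀ (L : List Int) (p0 r0 c0 : Int),
    L.Pairwise (· < ·) → p0 ∈ L → |mid - p0| < c0 →
    (∀ q ∈ L, |mid - p0| ≤ |mid - q|) →
    (∀ q ∈ L, |mid - q| = |mid - p0| → p0 ≤ q) →
    L.foldl (fun st p => if |mid - p| < st.2 then (p, |mid - p|) else st) (r0, c0)
      = (p0, |mid - p0|) := by
  intro L
  induction L with
  | nil => intro p0 r0 c0 _ hm _ _ _; exact absurd hm (List.not_mem_nil)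
  | cons a t ih =>
    intro p0 r0 c0 hs hm hlt hmin hfirst
    have hst := List.pairwise_cons.mp hs
    by_cases ha : |mid - a| < c0
    · by_cases hap : a = p0
      · subst hap
        simp only [List.foldl_cons, if_pos ha]
        exact pv_fold_no mid t a _ (fun q hq => hmin q (List.mem_cons_of_mem a hq))
      · have hp0t : p0 ∈ t := by
          rcases List.mem_cons.mp hm with h | h
          · exact absurd h.symm hap
          · exact h
        have hane : |mid - a| ≠ |mid - p0| := by
          intro he
          have h1 := hfirst a (List.mem_cons_self) he
          have h2 := hst.1 p0 hp0t
          omega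
        have hstrict : |mid - p0| < |mid - a| := by
          have := hmin a (List.mem_cons_self)
          omega
        simp only [List.foldl_cons, if_pos ha]
        exact ih p0 a _ hst.2 hp0t hstrict
          (fun q hq => hmin q (List.mem_cons_of_mem a hq))
          (fun q hq he => hfirst q (List.mem_cons_of_mem a hq) he)
    · have hap : a ≠ p0 := by
        intro he; rw [he] at ha; omega
      have hp0t : p0 ∈ t := by
        rcases List.mem_cons.mp hm with h | h
        · exact absurd h.symm hap
        · exact h
      simp only [List.foldl_cons, if_neg ha]
      exact ih p0 r0 c0 hst.2 hp0t hlt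
        (fun q hq => hmin q (List.mem_cons_of_mem a hq))
        (fun q hq he => hfirst q (List.mem_cons_of_mem a hq) he)

-- B's outward search: no hit in the scanned window ⇒ midpoint
theorem pv_search_none (s : List Char) (mid : Int) (d rem : Nat)
    (h : ∀ e : Nat, d ≤ e → e < d + rem →
      pvPunctAt s (mid - e) = false ∧ pvPunctAt s (mid + e) = false) :
    pvSearchGo s mid d rem = mid := by
  induction rem generalizing d with
  | zero => rfl
  | succ r ih =>
    have hd := h d (le_refl d) (by omega)
    unfold pvSearchGo
    rw [if_neg (by simp [hd.1]), if_neg (by simp [hd.2])]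
    exact ih (d + 1) (fun e h1 h2 => h e (by omega) (by omega))

-- B's outward search: first hit at distance d0, left side preferred
theorem pv_search_found (s : List Char) (mid : Int) (d rem d0 : Nat)
    (h1 : d ≤ d0) (h2 : d0 < d + rem)
    (hhit : (pvPunctAt s (mid - d0) || pvPunctAt s (mid + d0)) = true)
    (hmin : ∀ e : Nat, d ≤ e → e < d0 →
      pvPunctAt s (mid - e) = false ∧ pvPunctAt s (mid + e) = false) :
    pvSearchGo s mid d rem
      = if pvPunctAt s (mid - d0) then mid - (d0 : Int) else mid + (d0 : Int) := by
  induction rem generalizing d with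
  | zero => omega
  | succ r ih =>
    by_cases hdd : d = d0
    · subst hdd
      unfold pvSearchGo
      by_cases hl : pvPunctAt s (mid - d) = true
      · rw [if_pos hl, if_pos hl]
      · have hr : pvPunctAt s (mid + d) = true := by
          simp [hl] at hhit; exact hhit
        rw [if_neg hl, if_pos hr, if_neg hl]
    · have hde := hmin d (le_refl d) (by omega)
      unfold pvSearchGo
      rw [if_neg (by simp [hde.1]), if_neg (by simp [hde.2])]
      exact ih (d + 1) (by omega) (by omega) (fun e he1 he2 => hmin e (by omega) he2)

-- the common core: A's sort + min-scan tail equals B's outward-search tail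
theorem pv_tail_eq (s : List Char) : pvTailA s = pvTailB s := by
  unfold pvTailA pvTailB
  simp only []
  rw [pv_punct_merge]
  have hmid : PySem.Int.floordiv (s.length : Int) 2 = ((s.length / 2 : Nat) : Int) := by
    exact_mod_cast PySem.Int.floordiv_natCast s.length 2
  have hrad : PySem.Int.floordiv (s.length : Int) 8 = ((s.length / 8 : Nat) : Int) := by
    exact_mod_cast PySem.Int.floordiv_natCast s.length 8
  rw [hmid, hrad]
  simp only [Int.toNat_natCast]
  set n := s.length with hn
  set midN := n / 2 with hmidN
  set radN := n / 8 with hradN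
  set mid : Int := (midN : Int) with hmidI
  -- bounds on the probed window
  have hwin : ∀ d : Nat, d < radN → 0 ≤ mid - d ∧ mid - (d : Int) < n ∧ 0 ≤ mid + (d : Int) ∧ mid + (d : Int) < n := by
    intro d hd
    have : radN ≤ midN := by omega
    have : midN + radN ≤ n := by omega
    constructor; · omega
    constructor; · omega
    constructor; · omega
    · omega
  by_cases hex : ∃ e : Nat, e < radN ∧ (pvPunctAt s (mid - e) || pvPunctAt s (mid + e)) = true
  · -- a punctuation mark exists within the radius: both pick the closest, leftmost on ties
    have d0 := Nat.find hex
    have hspec := Nat.find_spec hex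
    have hminspec : ∀ e : Nat, e < Nat.find hex → ¬ (e < radN ∧ (pvPunctAt s (mid - e) || pvPunctAt s (mid + e)) = true) :=
      fun e he => Nat.find_min hex he
    set d₀ := Nat.find hex with hd₀
    have hd0rad : d₀ < radN := hspec.1
    have hhit := hspec.2
    have hminf : ∀ e : Nat, e < d₀ →
        pvPunctAt s (mid - e) = false ∧ pvPunctAt s (mid + e) = false := by
      intro e he
      have h := hminspec e he
      have herad : e < radN := by omega
      constructor
      · by_contra hc
        simp only [Bool.not_eq_false] at hc
        exact h ⟨herad, by simp [hc]⟩
      · by_contra hc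
        simp only [Bool.not_eq_false] at hc
        exact h ⟨herad, by simp [hc]⟩
    have hB : pvSearchGo s mid 0 radN
        = if pvPunctAt s (mid - d₀) then mid - (d₀ : Int) else mid + (d₀ : Int) :=
      pv_search_found s mid 0 radN d₀ (by omega) (by omega) hhit
        (fun e h1 h2 => hminf e h2)
    set p0 : Int := if pvPunctAt s (mid - d₀) then mid - (d₀ : Int) else mid + (d₀ : Int) with hp0
    have hbw := hwin d₀ hd0rad
    have hdist : |mid - p0| = (d₀ : Int) := by
      rw [hp0]; split_ifs <;> (simp only [Int.abs_eq_natAbs]; omega)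
    have hp0punct : pvPunctAt s p0 = true := by
      rw [hp0]
      by_cases hl : pvPunctAt s (mid - d₀) = true
      · rw [if_pos hl]; exact hl
      · rw [if_neg hl]
        simp [hl] at hhit; exact hhit
    have hp0mem : p0 ∈ pvP s := by
      rw [pv_mem_P_iff]
      refine ⟨?_, ?_, hp0punct⟩ <;> (rw [hp0]; split_ifs <;> omega)
    have hmin : ∀ q ∈ pvP s, |mid - p0| ≤ |mid - q| := by
      intro q hq
      rw [hdist]
      by_contra hc
      push Not at hc
      rw [Int.abs_eq_natAbs] at hc
      rcases pv_mem_P_iff.mp hq with ⟨hq0, hq1, hqp⟩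
      set e : Nat := (mid - q).natAbs with he
      have hed : e < d₀ := by omega
      have hf := hminf e hed
      have : q = mid - (e : Int) ∨ q = mid + (e : Int) := by omega
      rcases this with h | h <;> rw [← h] at hf
      · exact absurd hqp (by simp [hf.1])
      · exact absurd hqp (by simp [hf.2])
    have hfirst : ∀ q ∈ pvP s, |mid - q| = |mid - p0| → p0 ≤ q := by
      intro q hq he
      rw [hdist] at he
      rw [Int.abs_eq_natAbs] at he
      have hq2 : q = mid - (d₀ : Int) ∨ q = mid + (d₀ : Int) := by omega
      rw [hp0]
      by_cases hl : pvPunctAt s (mid - d₀) = true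
      · rw [if_pos hl]; omega
      · rw [if_neg hl]
        rcases hq2 with h | h
        · exfalso
          rw [h] at hq
          rcases pv_mem_P_iff.mp hq with ⟨_, _, hqp⟩
          exact hl hqp
        · omega
    have hA := pv_fold_yes mid (pvP s) p0 mid ((radN : Int)) (pv_P_pairwise s)
      hp0mem (by rw [hdist]; exact_mod_cast hd0rad) hmin hfirst
    rw [hA, hB]
    simp [PySem.List.slice_zero_start]
  · -- no punctuation within the radius: both fall back to the midpoint
    push Not at hex
    have hB : pvSearchGo s mid 0 radN = mid := by
      apply pv_search_none
      intro e h1 h2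
      have h := hex e (by omega)
      constructor
      · by_contra hc
        simp only [Bool.not_eq_false] at hc
        exact absurd (by simp [hc] : (pvPunctAt s (mid - e) || pvPunctAt s (mid + e)) = true) (by simpa using h)
      · by_contra hc
        simp only [Bool.not_eq_false] at hc
        exact absurd (by simp [hc] : (pvPunctAt s (mid - e) || pvPunctAt s (mid + e)) = true) (by simpa using h)
    have hA : (pvP s).foldl
        (fun st p => if |mid - p| < st.2 then (p, |mid - p|) else st) (mid, (radN : Int))
          = (mid, (radN : Int)) := by
      apply pv_fold_no
      intro p hp
      by_contra hc
      push Not at hc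
      rw [Int.abs_eq_natAbs] at hc
      rcases pv_mem_P_iff.mp hp with ⟨hp0, hp1, hpp⟩
      set e : Nat := (mid - p).natAbs with he
      have herad : e < radN := by omega
      have h := hex e herad
      have : p = mid - (e : Int) ∨ p = mid + (e : Int) := by omega
      rcases this with hq | hq
      · rw [← hq] at h; simp [hpp] at h
      · rw [← hq] at h; simp [hpp] at h
    rw [hA, hB]
    simp [PySem.List.slice_zero_start]

-- ===== the paren-truncation guard: A's 'in dline[-9:]' + occurrence list vs B's rfind =====

theorem pv_isPrefixOf_singleton (c : Char) (l : List Char) :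
    [c].isPrefixOf l = true ↔ l.head? = some c := by
  cases l with
  | nil => simp [List.isPrefixOf]
  | cons x t => simp [List.isPrefixOf]; exact ⟨fun h => by simp [h], fun h => by simp [h]⟩

theorem pv_rfind_go_spec (s : List Char) (c : Char) (k : Nat) :
    (PySem.Chars.rfind.go s [c] k = -1 ∧ ∀ j : Nat, j ≤ k → s[j]? ≠ some c) ∨
    (∃ jn : Nat, PySem.Chars.rfind.go s [c] k = (jn : Int) ∧ jn ≤ k ∧ s[jn]? = some c ∧
       ∀ j : Nat, jn < j → j ≤ k → s[j]? ≠ some c) := by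
  induction k with
  | zero =>
    by_cases h : [c].isPrefixOf s = true
    · right
      refine ⟨0, ?_, le_refl 0, ?_, ?_⟩
      · simp [PySem.Chars.rfind.go, h]
      · have := (pv_isPrefixOf_singleton c s).mp h
        simpa [List.head?_eq_getElem?] using this
      · intro j hj hj0; omega
    · left
      constructor
      · simp [PySem.Chars.rfind.go, h]
      · intro j hj
        interval_cases j
        intro hc
        apply h
        rw [pv_isPrefixOf_singleton]
        simpa [List.head?_eq_getElem?] using hc
  | succ k ih =>
    by_cases h : [c].isPrefixOf (List.drop (k+1) s) = true
    · right
      refine ⟨k+1, ?_, le_refl _, ?_, ?_⟩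
      · simp [PySem.Chars.rfind.go, h]
      · have := (pv_isPrefixOf_singleton c _).mp h
        rwa [List.head?_drop] at this
      · intro j hj hj' ; omega
    · have hk1 : s[k+1]? ≠ some c := by
        intro hc
        apply h
        rw [pv_isPrefixOf_singleton, List.head?_drop]
        exact hc
      have hgo : PySem.Chars.rfind.go s [c] (k+1) = PySem.Chars.rfind.go s [c] k := by
        simp [PySem.Chars.rfind.go, h]
      rcases ih with ⟨h1, h2⟩ | ⟨jn, h1, h2, h3, h4⟩
      · left
        refine ⟨by rw [hgo]; exact h1, ?_⟩
        intro j hj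
        rcases Nat.lt_or_ge j (k+1) with hlt | hge
        · exact h2 j (by omega)
        · have : j = k+1 := by omega
          subst this; exact hk1
      · right
        refine ⟨jn, by rw [hgo]; exact h1, by omega, h3, ?_⟩
        intro j hjn hj
        rcases Nat.lt_or_ge j (k+1) with hlt | hge
        · exact h4 j hjn (by omega)
        · have : j = k+1 := by omega
          subst this; exact hk1

theorem pv_rfind_spec (s : List Char) (c : Char) :
    (PySem.Chars.rfind s [c] = -1 ∧ ∀ j : Nat, j < s.length → s[j]? ≠ some c) ∨
    (∃ jn : Nat, PySem.Chars.rfind s [c] = (jn : Int) ∧ jn < s.length ∧ s[jn]? = some c ∧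
       ∀ j : Nat, jn < j → j < s.length → s[j]? ≠ some c) := by
  have h := pv_rfind_go_spec s c s.length
  rcases h with ⟨h1, h2⟩ | ⟨jn, h1, h2, h3, h4⟩
  · left
    exact ⟨h1, fun j hj => h2 j (by omega)⟩
  · right
    have hlt : jn < s.length := by
      rcases Nat.lt_or_ge jn s.length with h | h
      · exact h
      · exfalso; rw [List.getElem?_eq_none (by omega)] at h3; simp at h3
    exact ⟨jn, h1, hlt, h3, fun j hjn hj => h4 j hjn (by omega)⟩

theorem pv_getLast?_max (L : List Int) (h : L.Pairwise (· < ·)) (hne : L ≠ []) :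
    ∃ x, L.getLast? = some x ∧ x ∈ L ∧ ∀ y ∈ L, y ≤ x := by
  induction L with
  | nil => exact absurd rfl hne
  | cons a t ih =>
    cases t with
    | nil => exact ⟨a, rfl, by simp⟩
    | cons b u =>
      rcases ih (List.Pairwise.sublist (by simp) h) (by simp) with ⟨x, hx1, hx2, hx3⟩
      refine ⟨x, by simpa using hx1, List.mem_cons_of_mem a hx2, ?_⟩
      intro y hy
      rcases List.mem_cons.mp hy with rfl | hy'
      · have := (List.pairwise_cons.mp h).1 x hx2
        omega
      · exact hx3 y hy'

theorem pv_mem_drop_iff {s : List Char} {n : Nat} {c : Char} :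
    c ∈ s.drop n ↔ ∃ j : Nat, n ≤ j ∧ j < s.length ∧ s[j]? = some c := by
  constructor
  · intro h
    rcases List.mem_iff_getElem.mp h with ⟨k, hk, hget⟩
    have hlen : (s.drop n).length = s.length - n := List.length_drop
    refine ⟨n + k, by omega, by omega, ?_⟩
    rw [List.getElem?_eq_getElem (by omega)]
    rw [← hget, List.getElem_drop]
  · rintro ⟨j, hn, hj, hget⟩
    rw [List.getElem?_eq_getElem hj] at hget
    have hlen : (s.drop n).length = s.length - n := List.length_drop
    apply List.mem_iff_getElem.mpr
    refine ⟨j - n, by omega, ?_⟩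
    rw [List.getElem_drop]
    have hnj : n + (j - n) = j := by omega
    simp_rw [hnj]
    exact Option.some.inj hget

theorem pv_guard_iff (s : List Char) (h : 10 < (s.length : Int)) :
    (PySem.Chars.isIn ['('] (PySem.List.slice s (some (-9)) none) = true)
      ↔ (s.length : Int) - 9 ≤ PySem.Chars.rfind s ['('] := by
  have hslice : PySem.List.slice s (some (-9)) none = s.drop (s.length - 9) :=
    PySem.List.slice_from_neg_ofNat s 9 (by omega)
  rw [hslice]
  rw [PySem.Chars.isIn_iff_infix, List.singleton_infix_iff, pv_mem_drop_iff]
  have hlen : 10 < s.length := by exact_mod_cast h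
  rcases pv_rfind_spec s '(' with ⟨h1, h2⟩ | ⟨jn, h1, h2, h3, h4⟩
  · rw [h1]
    constructor
    · rintro ⟨j, _, hj, hget⟩; exact absurd hget (h2 j hj)
    · intro hle; omega
  · rw [h1]
    constructor
    · rintro ⟨j, hnj, hj, hget⟩
      by_contra hlt
      push Not at hlt
      have hjnj : jn < j := by
        have : (jn : Int) < (s.length : Int) - 9 := hlt
        omega
      exact absurd hget (h4 j hjnj hj)
    · intro hle
      exact ⟨jn, by omega, h2, h3⟩

theorem pv_lastparen_eq (s : List Char) (hne : pvFindOcc s '(' ≠ []) :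
    (PySem.List.pyGet? (pvFindOcc s '(') (-1)).getD 0 = PySem.Chars.rfind s ['('] := by
  rw [PySem.List.pyGet?_neg_one]
  rcases pv_getLast?_max (pvFindOcc s '(') (pv_occ_pairwise s '(') hne with ⟨x, hx1, hx2, hx3⟩
  rw [hx1]
  rcases pv_mem_occ.mp hx2 with ⟨k, hk, rfl, hkc⟩
  rcases pv_rfind_spec s '(' with ⟨h1, h2⟩ | ⟨jn, h1, h2, h3, h4⟩
  · exact absurd (by rw [List.getElem?_eq_getElem hk]; exact congrArg some hkc) (h2 k hk)
  · rw [h1]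
    have hjn_mem : (jn : Int) ∈ pvFindOcc s '(' := by
      apply pv_mem_occ.mpr
      refine ⟨jn, h2, rfl, ?_⟩
      have := h3; rw [List.getElem?_eq_getElem h2] at this; exact Option.some.inj this
    have h5 : (jn : Int) ≤ (k : Int) := hx3 _ hjn_mem
    have h6 : k ≤ jn := by
      by_contra hgt
      push Not at hgt
      exact absurd (by rw [List.getElem?_eq_getElem hk]; exact congrArg some hkc) (h4 k (by omega) hk)
    simp
    omega

theorem pv_occ_ne_nil (s : List Char)
    (hg : PySem.Chars.isIn ['('] (PySem.List.slice s (some (-9)) none) = true)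
    (_h10 : 10 < (s.length : Int)) : pvFindOcc s '(' ≠ [] := by
  have hslice : PySem.List.slice s (some (-9)) none = s.drop (s.length - 9) :=
    PySem.List.slice_from_neg_ofNat s 9 (by omega)
  rw [hslice, PySem.Chars.isIn_iff_infix, List.singleton_infix_iff, pv_mem_drop_iff] at hg
  rcases hg with ⟨j, _, hj, hget⟩
  intro hnil
  have : (j : Int) ∈ pvFindOcc s '(' := by
    apply pv_mem_occ.mpr
    exact ⟨j, hj, rfl, by rw [List.getElem?_eq_getElem hj] at hget; exact Option.some.inj hget⟩
  rw [hnil] at this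
  exact absurd this (List.not_mem_nil)

-- ===== VERDICT (by name: the statement is the Claim_ definition above) =====
theorem split_discard_line_spec : Claim_equal_split_discard_line := by
  intro dline _
  unfold Spec_split_discard_line split_discard_line split_discard_line_alt
  simp only []
  by_cases h10 : (10 : Int) < (dline.toList.length : Int)
  · by_cases hg : PySem.Chars.isIn ['('] (PySem.List.slice dline.toList (some (-9)) none) = true
    · rw [if_pos ⟨h10, hg⟩, if_pos h10, if_pos ((pv_guard_iff dline.toList h10).mp hg)]
      rw [pv_lastparen_eq dline.toList (pv_occ_ne_nil dline.toList hg h10)]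
      rw [PySem.List.slice_zero_start]
      exact pv_tail_eq _
    · rw [if_neg (by intro hc; exact hg hc.2), if_pos h10,
        if_neg (by intro hc; exact hg ((pv_guard_iff dline.toList h10).mpr hc))]
      exact pv_tail_eq _
  · rw [if_neg (by intro hc; exact h10 hc.1), if_neg h10]
    exact pv_tail_eq _
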